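-- pv_equiv track=rewrite | github.com/Lee-sh98/Coding-Study | 백준/Gold/2448. 별 찍기 － 11/별 찍기 － 11.py | solve
-- ===== SOURCE A (Python) =====
-- def supply1(prev, cover):
--     for p in prev:
--         yield p.join(cover)
--
-- def supply2(prev):
--     for p in zip(prev, prev):
--         yield " ".join(p)
--
-- def solve(n):
--     if n==3:
--         return ["  *  ", " * * ", "*****"]
--
--     n >>= 1
--     prev = solve(n)
--     result = []
--     cover = [" "*n, " "*n]
--
--     r1 = list(supply1(prev, cover))
--     r2 = list(supply2(prev))
--
--     return r1+r2
-- ===== SOURCE B (Python) =====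
-- def solve(n):
--     base = ["  *  ", " * * ", "*****"]
--
--     def height(m):
--         return 3 if m == 3 else 2 * height(m >> 1)
--
--     def row(m, r):
--         if m == 3:
--             return base[r]
--         h = m >> 1
--         if r < height(h):
--             pad = " " * h
--             return pad + row(h, r) + pad
--         s = row(h, r - height(h))
--         return s + " " + s
--
--     return [row(n, r) for r in range(height(n))]
-- ===== Notes on version B (the rewrite author's own statement) =====
-- stated objective: alternative
-- what changed: Instead of A's bottom-up recursion that rebuilds the whole list of lines at each level (padding/duplicating every previous line via generators), B computes each output line independently with a per-row recursion over the halving structure (plus a height helper), assembling the result as one comprehension over row indices.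
import Mathlib
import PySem

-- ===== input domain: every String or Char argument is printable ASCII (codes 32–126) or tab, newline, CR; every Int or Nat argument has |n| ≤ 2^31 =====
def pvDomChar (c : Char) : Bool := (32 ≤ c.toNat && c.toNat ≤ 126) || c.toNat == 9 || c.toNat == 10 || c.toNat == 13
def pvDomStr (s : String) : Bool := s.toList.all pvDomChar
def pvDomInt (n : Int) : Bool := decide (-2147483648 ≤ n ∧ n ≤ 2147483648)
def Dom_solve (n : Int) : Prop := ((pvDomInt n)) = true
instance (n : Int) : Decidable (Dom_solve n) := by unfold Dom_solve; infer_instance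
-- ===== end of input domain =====

-- B replaces A's level-by-level list rebuilding with an independent per-row recursion
-- (each output line is computed on its own from the halving structure): an alternative
-- decomposition of the same pattern, not claimed faster.

-- ===== PORT A =====

-- " " * m  (Python string repetition; empty for m ≤ 0 — exact)
def pyStrMul (s : String) (m : Int) : String := String.ofList (PySem.List.pyRepeat s.toList m)

def supply1 (prev : List String) (cover : List String) : List String :=
  prev.map (fun p => PySem.Str.join p cover)

def supply2 (prev : List String) : List String :=
  (prev.zip prev).map (fun p => PySem.Str.join " " [p.1, p.2])

-- fuel only guards termination: on every input where the Python A returns, the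
-- recursion depth is ≤ n.natAbs, so the fuel is never exhausted there.
def solveFuel : Nat → Int → List String
  | 0, _ => []
  | f + 1, n =>
    if n = 3 then ["  *  ", " * * ", "*****"]
    else
      let m := n >>> (1 : Nat)        -- n >>= 1
      let prev := solveFuel f m
      let cover := [pyStrMul " " m, pyStrMul " " m]
      supply1 prev cover ++ supply2 prev

def solve (n : Int) : List String := solveFuel (n.natAbs + 1) n

-- ===== PORT B =====

def baseRows : List String := ["  *  ", " * * ", "*****"]

-- Python str concatenation a + b (exact)
def strCat (a b : String) : String := String.ofList (a.toList ++ b.toList)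

-- " " * h in B (exact; empty for h ≤ 0)
def spacesB (h : Int) : String := String.ofList (List.replicate h.toNat ' ')

-- fuel only guards termination, as in port A
def heightFuel : Nat → Int → Int
  | 0, _ => 0
  | f + 1, m => if m = 3 then 3 else 2 * heightFuel f (m >>> (1 : Nat))

def rowFuel : Nat → Int → Int → String
  | 0, _, _ => ""
  | f + 1, m, r =>
    if m = 3 then (PySem.List.pyGet? baseRows r).getD ""   -- base[r] (in range on admitted inputs)
    else
      let h := m >>> (1 : Nat)
      if r < heightFuel f h then
        let pad := spacesB h
        strCat (strCat pad (rowFuel f h r)) pad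
      else
        let s := rowFuel f h (r - heightFuel f h)
        strCat (strCat s " ") s

def solve_alt (n : Int) : List String :=
  (PySem.List.pyRange 0 (heightFuel (n.natAbs + 1) n) 1).map (fun r => rowFuel (n.natAbs + 1) n r)

-- ===== PRECONDITION & SPEC =====

-- Pre: exactly the inputs on which the Python A terminates normally — those whose
-- repeated halving reaches the base size 3 (equivalently 3*2^k ≤ n < 4*2^k for some k);
-- on every other input both Pythons raise RecursionError, so Pre excludes no input A
-- returns on. The bound k < Nat.log2 n.toNat is IMPLIED by 3*2^k ≤ n (since then
-- 2^(k+1) ≤ n, so k + 1 ≤ log2 n) and only makes the existential decidable fast;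
-- it excludes nothing.
def Pre_solve (n : Int) : Prop := ∃ k : Nat, k < Nat.log2 n.toNat ∧ 3 * 2 ^ k ≤ n ∧ n < 2 ^ (k + 2)
instance (n : Int) : Decidable (Pre_solve n) := by unfold Pre_solve; infer_instance

def pvWitness_solve : Int := 3

def Spec_solve (n : Int) (out : List String) : Prop := out = solve_alt n
instance (n : Int) (out : List String) : Decidable (Spec_solve n out) := by unfold Spec_solve; infer_instance

-- ===== CLAIM (what is proved, stated in full; the proofs are below) =====
def Claim_equal_solve : Prop := ∀ (n : Int), Dom_solve n → Pre_solve n → Spec_solve n (solve n)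

-- ===== LEMMAS AND PROOFS =====

-- the halving octave: after k floor-halvings n becomes exactly the base size
def Oct (k : Nat) (n : Int) : Prop := 3 * 2 ^ k ≤ n ∧ n < 2 ^ (k + 2)

-- proof-level description of row r (as chars) of the pattern grown from n's halvings
def spC (h : Int) : List Char := List.replicate h.toNat ' '

def baseRowC : Nat → List Char :=
  fun r => if r = 0 then "  *  ".toList else if r = 1 then " * * ".toList else "*****".toList

def rowChars : Nat → Int → Nat → List Char
  | 0, _, r => baseRowC r
  | k + 1, n, r =>
    let h := n >>> (1 : Nat)
    if r < 3 * 2 ^ k then spC h ++ rowChars k h r ++ spC h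
    else rowChars k h (r - 3 * 2 ^ k) ++ [' '] ++ rowChars k h (r - 3 * 2 ^ k)

lemma oct_zero {n : Int} (h : Oct 0 n) : n = 3 := by
  obtain ⟨h1, h2⟩ := h; norm_num at h1 h2; omega

lemma int_two_le_two_pow (k : Nat) : (2 : Int) ≤ 2 ^ (k + 1) := by
  calc (2 : Int) = 2 ^ 1 := by norm_num
  _ ≤ 2 ^ (k + 1) := by
    apply pow_le_pow_right₀ <;> omega

lemma oct_ne_three {k : Nat} {n : Int} (h : Oct (k + 1) n) : n ≠ 3 := by
  have h2 := int_two_le_two_pow k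
  have h1 := h.1
  nlinarith

lemma shift_one_eq (n : Int) : n >>> (1 : Nat) = n / 2 := by
  rw [Int.shiftRight_eq_div_pow]; norm_num

lemma oct_half {k : Nat} {n : Int} (h : Oct (k + 1) n) : Oct k (n >>> (1 : Nat)) := by
  rw [shift_one_eq]
  obtain ⟨h1, h2⟩ := h
  have e1 : (3:Int) * 2 ^ (k + 1) = 2 * (3 * 2 ^ k) := by ring
  have e2 : (2:Int) ^ (k + 1 + 2) = 2 * 2 ^ (k + 2) := by ring
  constructor <;> omega

-- the computed height on the octave
lemma heightFuel_eq : ∀ (k f : Nat) (n : Int), k < f → Oct k n → heightFuel f n = 3 * 2 ^ k := by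
  intro k
  induction k with
  | zero =>
    intro f n hf ho
    cases f with
    | zero => omega
    | succ f' => rw [oct_zero ho]; simp [heightFuel]
  | succ k ih =>
    intro f n hf ho
    cases f with
    | zero => omega
    | succ f' =>
      have hne := oct_ne_three ho
      simp only [heightFuel, if_neg hne]
      rw [ih f' (n >>> (1 : Nat)) (by omega) (oct_half ho)]
      try ring

-- Python list.zip of a list with itself
lemma zip_self {α : Type} (l : List α) : l.zip l = l.map (fun a => (a, a)) := by
  induction l with
  | nil => rfl
  | cons x xs ih => simp [List.zip_cons_cons] at *; exact ih

lemma join_pair (p c d : String) :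
    (PySem.Str.join p [c, d]).toList = c.toList ++ p.toList ++ d.toList := by
  simp [PySem.Str.toList_join, PySem.Chars.join, List.intercalate, List.intersperse]

lemma pyStrMul_space_toList (m : Int) : (pyStrMul " " m).toList = spC m := by
  simp [pyStrMul, spC, PySem.List.pyRepeat_singleton]

-- A's whole result, row by row
lemma solveFuel_eq : ∀ (k f : Nat) (n : Int), k < f → Oct k n →
    solveFuel f n = (List.range (3 * 2 ^ k)).map (fun j => String.ofList (rowChars k n j)) := by
  intro k
  induction k with
  | zero =>
    intro f n hf ho
    cases f with
    | zero => omega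
    | succ f' =>
      rw [oct_zero ho]
      rw [show solveFuel (f' + 1) 3 = ["  *  ", " * * ", "*****"] from by norm_num [solveFuel]]
      decide
  | succ k ih =>
    intro f n hf ho
    cases f with
    | zero => omega
    | succ f' =>
      have hne := oct_ne_three ho
      have hoh := oct_half ho
      simp only [solveFuel, if_neg hne]
      rw [ih f' (n >>> (1 : Nat)) (by omega) hoh]
      rw [show 3 * 2 ^ (k + 1) = 3 * 2 ^ k + 3 * 2 ^ k by ring, List.range_add]
      rw [List.map_append]
      congr 1
      · -- supply1 on the first half
        simp only [supply1, List.map_map]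
        apply List.map_congr_left
        intro j hj
        rw [List.mem_range] at hj
        apply String.toList_inj.mp
        simp only [Function.comp_apply]
        rw [join_pair]
        simp only [rowChars, if_pos hj, String.toList_ofList,
          pyStrMul_space_toList, List.append_assoc]
      · -- supply2 on the second half
        simp only [supply2, zip_self, List.map_map]
        apply List.map_congr_left
        intro j hj
        rw [List.mem_range] at hj
        apply String.toList_inj.mp
        simp only [Function.comp_apply]
        rw [join_pair]
        have hnotlt : ¬ (3 * 2 ^ k + j < 3 * 2 ^ k) := by omega
        simp only [rowChars, if_neg hnotlt, String.toList_ofList,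
          Nat.add_sub_cancel_left, List.append_assoc]
        rfl

-- B's single row
lemma rowFuel_eq : ∀ (k f : Nat) (n r : Int), k < f → Oct k n → 0 ≤ r → r < 3 * 2 ^ k →
    rowFuel f n r = String.ofList (rowChars k n r.toNat) := by
  intro k
  induction k with
  | zero =>
    intro f n r hf ho hr0 hr3
    cases f with
    | zero => omega
    | succ f' =>
      rw [oct_zero ho]
      rw [show rowFuel (f' + 1) 3 r = (PySem.List.pyGet? baseRows r).getD "" from by
        norm_num [rowFuel]]
      norm_num at hr3
      interval_cases r <;> decide
  | succ k ih =>
    intro f n r hf ho hr0 hr3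
    cases f with
    | zero => omega
    | succ f' =>
      have hne := oct_ne_three ho
      have hoh := oct_half ho
      have hh := heightFuel_eq k f' (n >>> (1 : Nat)) (by omega) hoh
      simp only [rowFuel, if_neg hne, hh]
      by_cases hlt : r < 3 * 2 ^ k
      · rw [if_pos hlt]
        apply String.toList_inj.mp
        have hrn : r.toNat < 3 * 2 ^ k := by
          have : ((3 * 2 ^ k : Nat) : Int) = 3 * 2 ^ k := by push_cast; ring
          omega
        rw [ih f' (n >>> (1 : Nat)) r (by omega) hoh hr0 hlt]
        simp only [rowChars, if_pos hrn, strCat, spacesB, String.toList_ofList, spC,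
          List.append_assoc]
      · rw [if_neg hlt]
        apply String.toList_inj.mp
        have hcast : ((3 * 2 ^ k : Nat) : Int) = 3 * 2 ^ k := by push_cast; ring
        have hrn : ¬ (r.toNat < 3 * 2 ^ k) := by omega
        have h32 : (0:Int) < 3 * 2 ^ k := by positivity
        have hsub0 : 0 ≤ r - 3 * 2 ^ k := by omega
        have hsub3 : r - 3 * 2 ^ k < 3 * 2 ^ k := by
          have : (3:Int) * 2 ^ (k + 1) = 3 * 2 ^ k + 3 * 2 ^ k := by ring
          omega
        rw [ih f' (n >>> (1 : Nat)) (r - 3 * 2 ^ k) (by omega) hoh hsub0 hsub3]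
        have htn : (r - 3 * 2 ^ k).toNat = r.toNat - 3 * 2 ^ k := by omega
        simp only [rowChars, if_neg hrn, strCat, String.toList_ofList, htn,
          List.append_assoc]
        rfl

lemma int_lt_two_pow (k : Nat) : (k : Int) < 2 ^ k := by
  have := Nat.lt_two_pow_self (n := k)
  exact_mod_cast this

-- ===== VERDICT (by name: the statement is the Claim_ definition above) =====
theorem solve_spec : Claim_equal_solve := by
  intro n _hd hp
  obtain ⟨k, _hkn, h1, h2⟩ := hp
  have ho : Oct k n := ⟨h1, h2⟩
  have hpow : (k : Int) < 2 ^ k := int_lt_two_pow k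
  have hpos : (0:Int) < 2 ^ k := by positivity
  have hfuel : k < n.natAbs + 1 := by omega
  unfold Spec_solve solve solve_alt
  rw [solveFuel_eq k (n.natAbs + 1) n hfuel ho]
  rw [heightFuel_eq k (n.natAbs + 1) n hfuel ho]
  have h30 : ((3 * 2 ^ k : Nat) : Int) = 3 * 2 ^ k := by push_cast; ring
  rw [PySem.List.pyRange_one]
  have hlen : ((3 * 2 ^ k : Int) - 0).toNat = 3 * 2 ^ k := by omega
  rw [hlen, List.map_map]
  apply List.map_congr_left
  intro j hj
  rw [List.mem_range] at hj
  have hji : (0:Int) ≤ 0 + (j : Int) := by omega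
  have hjlt : (0:Int) + (j : Int) < 3 * 2 ^ k := by omega
  rw [Function.comp_apply, rowFuel_eq k (n.natAbs + 1) n (0 + (j:Int)) hfuel ho hji hjlt]
  have : ((0:Int) + (j:Int)).toNat = j := by omega
  rw [this]
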